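-- pv_equiv track=rewrite | github.com/notshridhar/chain-reaction-ai | core/engine.py | create_neighbor_table
-- ===== SOURCE A (Python) =====
-- def create_neighbor_table(shape):
--     """ Store neighboring indices for quick lookup """
--     s_h, s_w = shape
--     n_table = [0] * s_w * s_h
--     for idx in range(s_h * s_w):
--         i_y, i_x = idx // s_w, idx % s_w
--         temp = [
--             idx - s_w if i_y > 0 else None,
--             idx + s_w if i_y < s_h - 1 else None,
--             idx - 1 if i_x > 0 else None,
--             idx + 1 if i_x < s_w - 1 else None,
--         ]
--         n_table[idx] = tuple(filter(None.__ne__, temp))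
--     return tuple(n_table)
-- ===== SOURCE B (Python) =====
-- def create_neighbor_table(shape):
--     """ Store neighboring indices for quick lookup """
--     s_h, s_w = shape
--     n = s_h * s_w
--     nbr = [[] for _ in range(n)]
--     for idx in range(s_w, n):            # up sweep: all cells below the top row
--         nbr[idx].append(idx - s_w)
--     for idx in range(n - s_w):           # down sweep: all cells above the bottom row
--         nbr[idx].append(idx + s_w)
--     for row in range(s_h):               # left sweep: every cell but the first of each row
--         for idx in range(row * s_w + 1, (row + 1) * s_w):
--             nbr[idx].append(idx - 1)
--     for row in range(s_h):               # right sweep: every cell but the last of each row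
--         for idx in range(row * s_w, (row + 1) * s_w - 1):
--             nbr[idx].append(idx + 1)
--     return tuple(map(tuple, nbr))
-- ===== Notes on version B (the rewrite author's own statement) =====
-- stated objective: alternative
-- what changed: B replaces A's per-cell pass (computing i_y,i_x via // and % and testing four boundary conditions for every cell) with four whole-grid direction sweeps: each sweep appends one direction's neighbor over exactly the contiguous index range(s) of cells that have it (up: range(s_w,n), down: range(n-s_w), left/right: per-row ranges), with no conditionals and no modular arithmetic; per-cell order up,down,left,right emerges from the pass order.
-- outside the precondition, e.g. on create_neighbor_table((0, -1)): A returns (), B raises IndexError; on create_neighbor_table((-2, -2)): A raises IndexError, B raises IndexError; on create_neighbor_table((3,)): A raises ValueError, B raises ValueError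
import Mathlib
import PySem

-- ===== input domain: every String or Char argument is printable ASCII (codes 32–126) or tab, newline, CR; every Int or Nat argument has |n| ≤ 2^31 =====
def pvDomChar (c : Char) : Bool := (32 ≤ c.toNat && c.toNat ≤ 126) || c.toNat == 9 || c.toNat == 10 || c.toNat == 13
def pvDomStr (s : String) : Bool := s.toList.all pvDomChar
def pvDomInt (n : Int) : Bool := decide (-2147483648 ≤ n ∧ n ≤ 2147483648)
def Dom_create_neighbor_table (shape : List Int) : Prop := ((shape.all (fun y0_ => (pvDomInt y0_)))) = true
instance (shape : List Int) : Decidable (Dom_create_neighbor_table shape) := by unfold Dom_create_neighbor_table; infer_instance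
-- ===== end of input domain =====

set_option maxHeartbeats 1000000


-- B builds the table by four whole-grid direction sweeps (up, down, left, right), each
-- appending one direction's neighbor over exactly the index ranges of cells that have it,
-- instead of A's per-cell //,% coordinate computation with four boundary conditionals.
-- Alternative decomposition, same asymptotic cost.

-- ===== PORT A =====
-- one iteration of A's loop: the four-element temp list, then filter(None.__ne__)
def pvCellA (s_h s_w idx : Int) : List Int :=
  let i_y := PySem.Int.floordiv idx s_w
  let i_x := PySem.Int.mod idx s_w
  let temp : List (Option Int) :=
    [ if 0 < i_y then some (idx - s_w) else none,
      if i_y < s_h - 1 then some (idx + s_w) else none,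
      if 0 < i_x then some (idx - 1) else none,
      if i_x < s_w - 1 then some (idx + 1) else none ]
  temp.filterMap id

def create_neighbor_table (shape : List Int) : List (List Int) :=
  match shape with
  | [s_h, s_w] => (PySem.List.pyRange 0 (s_h * s_w) 1).map (pvCellA s_h s_w)
  | _ => []   -- unreachable under Pre_ (Python raises ValueError when unpacking)

-- ===== PORT B =====
-- nbr[idx].append(v); idx is nonnegative on every input admitted by Pre_, so .toNat is exact
def pvAppendAt (t : List (List Int)) (idx v : Int) : List (List Int) :=
  t.modify idx.toNat (fun r => r ++ [v])

def create_neighbor_table_alt (shape : List Int) : List (List Int) :=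
  -- 's_h, s_w = shape': modeled as a length test plus positional reads
  -- (on any other length Python raises ValueError; those inputs are outside Pre_)
  if shape.length = 2 then
    let s_h := shape.getD 0 0
    let s_w := shape.getD 1 0
      let n := s_h * s_w
      let nbr0 : List (List Int) := List.replicate n.toNat []
      -- up sweep
      let nbr1 := (PySem.List.pyRange s_w n 1).foldl
          (fun t idx => pvAppendAt t idx (idx - s_w)) nbr0
      -- down sweep
      let nbr2 := (PySem.List.pyRange 0 (n - s_w) 1).foldl
          (fun t idx => pvAppendAt t idx (idx + s_w)) nbr1
      -- left sweep, row by row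
      let nbr3 := (PySem.List.pyRange 0 s_h 1).foldl
          (fun t row => (PySem.List.pyRange (row * s_w + 1) ((row + 1) * s_w) 1).foldl
            (fun t idx => pvAppendAt t idx (idx - 1)) t) nbr2
      -- right sweep, row by row
      (PySem.List.pyRange 0 s_h 1).foldl
          (fun t row => (PySem.List.pyRange (row * s_w) ((row + 1) * s_w - 1) 1).foldl
            (fun t idx => pvAppendAt t idx (idx + 1)) t) nbr3
  else []

-- ===== PRECONDITION & SPEC =====
-- Pre_ excludes exactly the inputs where one of the two programs RAISES: shapes not of
-- length 2 (both unpackings raise ValueError), both-entries-negative shapes (positive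
-- product, empty n_table: both raise IndexError), and shapes [0, w] with w < 0, where A
-- happens to return () from its empty loop while B's up sweep range(w, 0) is nonempty and
-- raises IndexError on the empty nbr list.
def Pre_create_neighbor_table (shape : List Int) : Prop :=
  shape.length = 2 ∧ (0 ≤ shape.getD 0 0 ∨ 0 ≤ shape.getD 1 0) ∧
    ¬(shape.getD 0 0 = 0 ∧ shape.getD 1 0 < 0)
instance (shape : List Int) : Decidable (Pre_create_neighbor_table shape) := by
  unfold Pre_create_neighbor_table; infer_instance

def pvWitness_create_neighbor_table : List Int := [2, 3]

def Spec_create_neighbor_table (shape : List Int) (out : List (List Int)) : Prop :=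
  out = create_neighbor_table_alt shape
instance (shape : List Int) (out : List (List Int)) : Decidable (Spec_create_neighbor_table shape out) := by
  unfold Spec_create_neighbor_table; infer_instance

-- ===== CLAIM (what is proved, stated in full; the proofs are below) =====
def Claim_equal_create_neighbor_table : Prop :=
  ∀ (shape : List Int), Dom_create_neighbor_table shape → Pre_create_neighbor_table shape →
    Spec_create_neighbor_table shape (create_neighbor_table shape)

-- ===== LEMMAS AND PROOFS =====

-- a sweep over an empty state leaves it empty (the n ≤ 0 cases)
theorem pvAppendAt_nil (idx v : Int) : pvAppendAt [] idx v = [] := by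
  simp [pvAppendAt]

theorem pvFoldl_nil (f : List (List Int) → Int → List (List Int))
    (hf : ∀ i, f [] i = []) (l : List Int) : l.foldl f [] = [] := by
  induction l with
  | nil => rfl
  | cons x xs ih =>
    simp only [List.foldl_cons, hf]
    exact ih

-- one direction sweep over the contiguous nat index range [a, a+k) appends f i to cell i
theorem pvPass (f : Int → Int) (g : Nat → List Int) (n a k : Nat) (h : a + k ≤ n) :
    (PySem.List.pyRange (a : Int) ((a + k : Nat) : Int) 1).foldl
        (fun t idx => pvAppendAt t idx (f idx)) ((List.range n).map g)
      = (List.range n).map (fun i => if a ≤ i ∧ i < a + k then g i ++ [f (i : Int)] else g i) := by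
  induction k with
  | zero =>
    rw [PySem.List.pyRange_one_eq_nil (by simp)]
    simp only [List.foldl_nil]
    apply List.map_congr_left
    intro i _
    rw [if_neg (by omega)]
  | succ k ih =>
    have hc : ((a + (k + 1) : Nat) : Int) = ((a + k : Nat) : Int) + 1 := by push_cast; ring
    rw [hc, PySem.List.pyRange_one_succ_right (by exact_mod_cast Nat.le_add_right a k),
        List.foldl_append, ih (by omega)]
    simp only [List.foldl_cons, List.foldl_nil, pvAppendAt]
    have ht : ((a + k : Nat) : Int).toNat = a + k := by omega
    rw [ht]
    apply List.ext_getElem (by simp)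
    intro i h1 h2
    simp only [List.length_map, List.length_range] at h2
    simp only [List.getElem_modify, List.getElem_map, List.getElem_range]
    by_cases e : a + k = i
    · subst e
      rw [if_pos rfl, if_neg (by omega), if_pos (by omega)]
    · rw [if_neg e]
      split_ifs with h3 h4 h4 <;> first | rfl | (exfalso; omega)

-- pvPass restated with the Int bounds that appear in the port
theorem pvPass' (f : Int → Int) (g : Nat → List Int) (n : Nat) (a b : Int)
    (ha : 0 ≤ a) (hb : b.toNat ≤ n) :
    (PySem.List.pyRange a b 1).foldl (fun t idx => pvAppendAt t idx (f idx))
        ((List.range n).map g)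
      = (List.range n).map
          (fun i => if a.toNat ≤ i ∧ i < b.toNat then g i ++ [f (i : Int)] else g i) := by
  by_cases hab : a ≤ b
  · have e1 : a = ((a.toNat : Nat) : Int) := by omega
    have e2 : b = ((a.toNat + (b.toNat - a.toNat) : Nat) : Int) := by omega
    conv_lhs => rw [e1, e2]
    rw [pvPass f g n a.toNat (b.toNat - a.toNat) (by omega)]
    apply List.map_congr_left
    intro i _
    split_ifs with h1 h2 h2 <;> first | rfl | (exfalso; omega)
  · rw [PySem.List.pyRange_one_eq_nil (by omega)]
    simp only [List.foldl_nil]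
    apply List.map_congr_left
    intro i _
    rw [if_neg (by omega)]

-- the left sweep over the first r rows
theorem pvLeftRows (g : Nat → List Int) (H W : Nat) (hW : 0 < W) (r : Nat) (hr : r ≤ H) :
    (PySem.List.pyRange 0 (r : Int) 1).foldl
        (fun t row => (PySem.List.pyRange (row * (W : Int) + 1) ((row + 1) * (W : Int)) 1).foldl
          (fun t idx => pvAppendAt t idx (idx - 1)) t) ((List.range (H * W)).map g)
      = (List.range (H * W)).map
          (fun i => if i < r * W ∧ i % W ≠ 0 then g i ++ [(i : Int) - 1] else g i) := by
  induction r with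
  | zero =>
    rw [PySem.List.pyRange_one_eq_nil (by simp)]
    simp only [List.foldl_nil]
    apply List.map_congr_left
    intro i _
    rw [if_neg (by omega)]
  | succ r ih =>
    have hc : ((r + 1 : Nat) : Int) = (r : Int) + 1 := by push_cast; ring
    rw [hc, PySem.List.pyRange_one_succ_right (Int.natCast_nonneg r),
        List.foldl_append, ih (by omega)]
    simp only [List.foldl_cons, List.foldl_nil]
    have e1 : (r : Int) * (W : Int) + 1 = ((r * W + 1 : Nat) : Int) := by push_cast; ring
    have e2 : ((r : Int) + 1) * (W : Int) = (((r * W + 1) + (W - 1) : Nat) : Int) := by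
      push_cast [Nat.cast_sub hW]; ring
    rw [e1, e2, pvPass (fun idx => idx - 1) _ (H * W) (r * W + 1) (W - 1)
        (by have hm : (r + 1) * W = r * W + W := Nat.succ_mul r W
            have := Nat.mul_le_mul_right W (show r + 1 ≤ H by omega); omega)]
    apply List.map_congr_left
    intro i hi
    have hm : (r + 1) * W = r * W + W := Nat.succ_mul r W
    by_cases hband : r * W ≤ i ∧ i < r * W + W
    · have hkey : i % W = i - r * W := by
        have e : i = (i - r * W) + r * W := by omega
        conv_lhs => rw [e]
        rw [Nat.add_mul_mod_self_right, Nat.mod_eq_of_lt (by omega)]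
      split_ifs with h1 h2 h2 <;> first | rfl | (exfalso; omega)
    · split_ifs with h1 h2 h2 <;> first | rfl | (exfalso; omega)

-- the right sweep over the first r rows
theorem pvRightRows (g : Nat → List Int) (H W : Nat) (hW : 0 < W) (r : Nat) (hr : r ≤ H) :
    (PySem.List.pyRange 0 (r : Int) 1).foldl
        (fun t row => (PySem.List.pyRange (row * (W : Int)) ((row + 1) * (W : Int) - 1) 1).foldl
          (fun t idx => pvAppendAt t idx (idx + 1)) t) ((List.range (H * W)).map g)
      = (List.range (H * W)).map
          (fun i => if i < r * W ∧ i % W + 1 < W then g i ++ [(i : Int) + 1] else g i) := by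
  induction r with
  | zero =>
    rw [PySem.List.pyRange_one_eq_nil (by simp)]
    simp only [List.foldl_nil]
    apply List.map_congr_left
    intro i _
    rw [if_neg (by omega)]
  | succ r ih =>
    have hc : ((r + 1 : Nat) : Int) = (r : Int) + 1 := by push_cast; ring
    rw [hc, PySem.List.pyRange_one_succ_right (Int.natCast_nonneg r),
        List.foldl_append, ih (by omega)]
    simp only [List.foldl_cons, List.foldl_nil]
    have e1 : (r : Int) * (W : Int) = ((r * W : Nat) : Int) := by push_cast; ring
    have e2 : ((r : Int) + 1) * (W : Int) - 1 = (((r * W) + (W - 1) : Nat) : Int) := by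
      push_cast [Nat.cast_sub hW]; ring
    rw [e1, e2, pvPass (fun idx => idx + 1) _ (H * W) (r * W) (W - 1)
        (by have hm : (r + 1) * W = r * W + W := Nat.succ_mul r W
            have := Nat.mul_le_mul_right W (show r + 1 ≤ H by omega); omega)]
    apply List.map_congr_left
    intro i hi
    have hm : (r + 1) * W = r * W + W := Nat.succ_mul r W
    by_cases hband : r * W ≤ i ∧ i < r * W + W
    · have hkey : i % W = i - r * W := by
        have e : i = (i - r * W) + r * W := by omega
        conv_lhs => rw [e]
        rw [Nat.add_mul_mod_self_right, Nat.mod_eq_of_lt (by omega)]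
      split_ifs with h1 h2 h2 <;> first | rfl | (exfalso; omega)
    · split_ifs with h1 h2 h2 <;> first | rfl | (exfalso; omega)

-- after all four sweeps, cell i holds exactly A's filtered neighbor tuple
theorem pvFinal (H W i : Nat) (hW : 0 < W) (hH : 0 < H) (hi : i < H * W) :
    (let g1 := fun i => if W ≤ i ∧ i < H * W then
        ([] : List Int) ++ [(i : Int) - W] else [];
     let g2 := fun i => if 0 ≤ i ∧ i < H * W - W then g1 i ++ [(i : Int) + W] else g1 i;
     let g3 := fun i => if i < H * W ∧ i % W ≠ 0 then g2 i ++ [(i : Int) - 1] else g2 i;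
     if i < H * W ∧ i % W + 1 < W then g3 i ++ [(i : Int) + 1] else g3 i)
      = pvCellA (H : Int) (W : Int) (i : Int) := by
  have hWn : W ≤ H * W := Nat.le_mul_of_pos_left W hH
  have d1 : 0 < i / W ↔ W ≤ i := by
    rw [Nat.div_pos_iff]; omega
  have d2 : i / W < H - 1 ↔ i + W < H * W := by
    rw [Nat.div_lt_iff_lt_mul hW]
    have e : (H - 1) * W = H * W - W := by
      cases H with
      | zero => omega
      | succ m => simp [Nat.succ_mul]
    omega
  have d4 : i % W < W := Nat.mod_lt _ hW
  have c1 : (0 : Int) < (i / W : Nat) ↔ W ≤ i := by rw [← d1]; exact_mod_cast Iff.rfl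
  have c2 : ((i / W : Nat) : Int) < (H : Int) - 1 ↔ i + W < H * W := by
    rw [← d2]; omega
  have c3 : (0 : Int) < ((i % W : Nat) : Int) ↔ i % W ≠ 0 := by omega
  have c4 : ((i % W : Nat) : Int) < (W : Int) - 1 ↔ i % W + 1 < W := by omega
  simp only [pvCellA, PySem.Int.mod_natCast, PySem.Int.floordiv_natCast, c1, c2, c3, c4]
  split_ifs <;> first | (exfalso; omega) | simp [id]

theorem pvShape_two (shape : List Int) (h : shape.length = 2) :
    ∃ a b, shape = [a, b] := by
  match shape, h with
  | [a, b], _ => exact ⟨a, b, rfl⟩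

-- ===== VERDICT (by name: the statement is the Claim_ definition above) =====
theorem create_neighbor_table_spec : Claim_equal_create_neighbor_table := by
  intro shape _hdom hpre
  obtain ⟨hlen, hsign, hzero⟩ := hpre
  obtain ⟨s_h, s_w, rfl⟩ := pvShape_two shape hlen
  simp only [List.getD, List.getElem?_cons_zero, List.getElem?_cons_succ,
    Option.getD_some] at hsign hzero
  unfold Spec_create_neighbor_table
  dsimp only [create_neighbor_table, create_neighbor_table_alt]
  rw [if_pos (show ([s_h, s_w] : List Int).length = 2 from rfl)]
  simp only [List.getD, List.getElem?_cons_zero, List.getElem?_cons_succ, Option.getD_some]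
  by_cases hn : s_h * s_w ≤ 0
  · rw [PySem.List.pyRange_one_eq_nil hn, List.map_nil,
        show (s_h * s_w).toNat = 0 from by omega, List.replicate_zero,
        pvFoldl_nil _ (fun i => pvAppendAt_nil _ _),
        pvFoldl_nil _ (fun i => pvAppendAt_nil _ _),
        pvFoldl_nil _ (fun r => pvFoldl_nil _ (fun i => pvAppendAt_nil _ _) _),
        pvFoldl_nil _ (fun r => pvFoldl_nil _ (fun i => pvAppendAt_nil _ _) _)]
  · have hpos : 0 < s_h ∧ 0 < s_w := by
      rcases Int.mul_pos_iff.mp (by omega : 0 < s_h * s_w) with h | h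
      · exact h
      · exfalso; omega
    obtain ⟨h1, h2⟩ := hpos
    lift s_h to Nat using h1.le with H
    lift s_w to Nat using h2.le with W
    have hW : 0 < W := by exact_mod_cast h2
    have hH : 0 < H := by exact_mod_cast h1
    have hWn : W ≤ H * W := Nat.le_mul_of_pos_left W hH
    rw [show ((H : Int) * (W : Int)) = ((H * W : Nat) : Int) from by push_cast; ring,
        show ((H * W : Nat) : Int).toNat = H * W from Int.toNat_natCast _,
        show (List.replicate (H * W) ([] : List Int))
            = (List.range (H * W)).map (fun _ => []) from by simp,
        pvPass' (fun idx => idx - (W : Int)) _ (H * W) _ _ (Int.natCast_nonneg W) (by simp),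
        pvPass' (fun idx => idx + (W : Int)) _ (H * W) _ _ le_rfl (by omega),
        pvLeftRows _ H W hW H le_rfl,
        pvRightRows _ H W hW H le_rfl,
        PySem.List.pyRange_one, List.map_map]
    simp only [Int.sub_zero, Int.toNat_natCast]
    apply List.map_congr_left
    intro i hi
    have hi' : i < H * W := List.mem_range.mp hi
    simp only [Function.comp, zero_add, Int.toNat_zero,
      show (((H * W : Nat) : Int) - ((W : Nat) : Int)).toNat = H * W - W from by omega]
    exact (pvFinal H W i hW hH hi').symm
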